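-- pv_equiv track=rewrite | github.com/CertCh/DZ_SHIROKOV_ANDREY | DZ-main/Задачи 2/scr13.py | remove_stroki
-- ===== SOURCE A (Python) =====
-- def remove_stroki(string):
--   string = string.strip()
--   result = ""
--   prev_space = False
--   for char in string:
--     if char != " ":
--       result += char
--       prev_space = False
--     elif not prev_space:
--       result += char
--       prev_space = True
--   return result
-- ===== SOURCE B (Python) =====
-- import re
--
-- def remove_stroki(string):
--   return re.sub(r' +', ' ', string.strip())
-- ===== Notes on version B (the rewrite author's own statement) =====
-- stated objective: faster
-- what changed: Replaces the explicit character loop with prev_space bookkeeping and repeated string concatenation by a single C-level regex substitution collapsing each maximal run of spaces after strip().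
import Mathlib
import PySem

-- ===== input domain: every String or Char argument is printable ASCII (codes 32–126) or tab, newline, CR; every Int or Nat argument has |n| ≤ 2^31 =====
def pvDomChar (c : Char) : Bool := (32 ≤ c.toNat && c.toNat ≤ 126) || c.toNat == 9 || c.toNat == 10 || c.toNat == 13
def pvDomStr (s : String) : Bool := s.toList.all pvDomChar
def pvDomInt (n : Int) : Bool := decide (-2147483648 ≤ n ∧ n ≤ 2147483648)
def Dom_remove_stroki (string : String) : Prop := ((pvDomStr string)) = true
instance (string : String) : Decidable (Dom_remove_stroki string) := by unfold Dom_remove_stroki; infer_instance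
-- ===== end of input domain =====

-- B replaces A's char loop with prev_space flag by a regex substitution collapsing
-- each maximal run of spaces after strip(); equivalence of return values is proved.

-- ===== PORT A =====
-- A's loop: for char in stripped string, append unless it is a space following a space.
def remove_stroki (string : String) : String :=
  let stripped := PySem.Str.strip string
  let st := stripped.toList.foldl
    (fun (st : List Char × Bool) char =>
      if char ≠ ' ' then (st.1 ++ [char], false)
      else if !st.2 then (st.1 ++ [char], true)
      else st)
    ([], false)
  String.mk st.1

-- ===== PORT B =====
-- re.sub(r' +', ' ', ·): scan left to right; each maximal run of one-or-more
-- spaces is emitted as a single space (exact for this pattern/replacement).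
def pvCollapse : List Char → List Char
  | [] => []
  | c :: cs =>
      if c = ' ' then ' ' :: pvCollapse (cs.dropWhile (· = ' '))
      else c :: pvCollapse cs
termination_by l => l.length
decreasing_by
  · exact Nat.lt_succ_of_le (List.length_dropWhile_le _ _)
  · simp

def remove_stroki_alt (string : String) : String :=
  String.mk (pvCollapse (PySem.Str.strip string).toList)

-- ===== PRECONDITION & SPEC =====
def Spec_remove_stroki (string : String) (out : String) : Prop := out = remove_stroki_alt string
instance (string : String) (out : String) : Decidable (Spec_remove_stroki string out) := by unfold Spec_remove_stroki; infer_instance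

-- ===== CLAIM (what is proved, stated in full; the proofs are below) =====
def Claim_equal_remove_stroki : Prop := ∀ (string : String), Dom_remove_stroki string → Spec_remove_stroki string (remove_stroki string)

-- ===== LEMMAS AND PROOFS =====

theorem pvFold_collapse (l : List Char) :
    ∀ (acc : List Char) (b : Bool),
      (l.foldl
        (fun (st : List Char × Bool) char =>
          if char ≠ ' ' then (st.1 ++ [char], false)
          else if !st.2 then (st.1 ++ [char], true)
          else st)
        (acc, b)).1
      = acc ++ (if b then pvCollapse (l.dropWhile (· = ' ')) else pvCollapse l) := by
  induction l with
  | nil => intro acc b; cases b <;> simp [pvCollapse]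
  | cons c cs ih =>
      intro acc b
      by_cases hc : c = ' '
      · subst hc
        cases b with
        | false =>
            rw [List.foldl_cons]
            simp only [ne_eq, not_true_eq_false, Bool.false_eq_true, if_false, Bool.not_false,
              if_true]
            rw [ih]
            simp [pvCollapse]
        | true =>
            rw [List.foldl_cons]
            simp only [ne_eq, not_true_eq_false, Bool.false_eq_true, if_false, Bool.not_true]
            rw [ih]
            simp [List.dropWhile]
      · cases b with
        | false =>
            simp only [List.foldl_cons, if_pos hc]
            rw [ih]
            simp [pvCollapse, hc]
        | true =>
            simp only [List.foldl_cons, if_pos hc]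
            rw [ih]
            simp [pvCollapse, List.dropWhile, hc]

-- ===== VERDICT (by name: the statement is the Claim_ definition above) =====
theorem remove_stroki_spec : Claim_equal_remove_stroki := by
  intro string _
  unfold Spec_remove_stroki remove_stroki remove_stroki_alt
  simp only []
  rw [pvFold_collapse]
  simp
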